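-- pv_equiv track=rewrite | github.com/Gabaly92/Fansite-Analytics | src/process_log.py | check3
-- ===== SOURCE A (Python) =====
-- def check3(l):
--     fail_score = 0
--     if len(l) < 3:
--         return False
--     else:
--         for v in l:
--             if v == False:
--                 fail_score += 1
--             else:
--                 fail_score = 0
--         if fail_score == 3:
--             return True
--         else:
--             return False
-- ===== SOURCE B (Python) =====
-- def check3(l):
--     if len(l) < 3:
--         return False
--     return (l[-1] == False and l[-2] == False and l[-3] == False
--             and (len(l) == 3 or l[-4] != False))
-- ===== Notes on version B (the rewrite author's own statement) =====
-- stated objective: faster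
-- what changed: Replaces the full accumulating scan over the whole list by a constant-time check of the last three (and fourth-from-last) elements via negative indexing.
import Mathlib
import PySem

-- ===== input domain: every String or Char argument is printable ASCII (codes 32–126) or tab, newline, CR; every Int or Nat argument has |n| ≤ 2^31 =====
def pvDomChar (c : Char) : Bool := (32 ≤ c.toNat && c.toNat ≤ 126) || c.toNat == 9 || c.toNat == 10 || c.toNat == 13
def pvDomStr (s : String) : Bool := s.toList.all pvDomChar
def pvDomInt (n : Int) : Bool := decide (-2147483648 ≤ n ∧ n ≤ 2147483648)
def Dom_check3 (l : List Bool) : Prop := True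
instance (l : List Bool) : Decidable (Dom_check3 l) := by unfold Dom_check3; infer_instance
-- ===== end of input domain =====

-- B replaces A's full accumulating scan by a constant-time check of the last three
-- (and fourth-from-last) elements via negative indexing (objective: faster).


-- ===== PORT A =====
def check3 (l : List Bool) : Bool :=
  let fail_score : Nat := 0
  if l.length < 3 then false
  else
    let fs := l.foldl (fun s v => if v == false then s + 1 else 0) fail_score
    if fs == 3 then true else false

-- ===== PORT B =====
def check3_alt (l : List Bool) : Bool :=
  if l.length < 3 then false
  else (PySem.List.pyGet? l (-1) == some false) &&
       (PySem.List.pyGet? l (-2) == some false) &&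
       (PySem.List.pyGet? l (-3) == some false) &&
       (decide (l.length = 3) || !(PySem.List.pyGet? l (-4) == some false))

-- ===== PRECONDITION & SPEC =====
def Spec_check3 (l : List Bool) (out : Bool) : Prop := out = check3_alt l
instance (l : List Bool) (out : Bool) : Decidable (Spec_check3 l out) := by unfold Spec_check3; infer_instance

-- ===== CLAIM (what is proved, stated in full; the proofs are below) =====
def Claim_equal_check3 : Prop := ∀ (l : List Bool), Dom_check3 l → Spec_check3 l (check3 l)

-- ===== LEMMAS AND PROOFS =====

theorem pyGet_neg4 (xs : List Bool) (w x y z : Bool) :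
    PySem.List.pyGet? (xs ++ [w, x, y, z]) (-4) = some w := by
  have h := PySem.List.pyGet?_neg_natCast (xs := xs ++ [w, x, y, z]) (k := 4)
    (by omega) (by simp)
  norm_num at h
  exact h

-- fail score of A's loop, computed on the REVERSED list
def gscore : List Bool → Nat → Nat
  | [], s => s
  | v :: t, s => if v == false then gscore t s + 1 else 0

theorem foldl_rev (r : List Bool) : ∀ s : Nat,
    r.reverse.foldl (fun s v => if v == false then s + 1 else 0) s = gscore r s := by
  induction r with
  | nil => intro s; rfl
  | cons v t ih =>
      intro s
      simp only [List.reverse_cons, List.foldl_append, List.foldl_cons, List.foldl_nil, ih, gscore]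

theorem main_rev (r : List Bool) : check3 r.reverse = check3_alt r.reverse := by
  match r with
  | [] => rfl
  | [a] => cases a <;> rfl
  | [a, b] => cases a <;> cases b <;> rfl
  | a :: b :: c :: rest =>
      have hlen : (a :: b :: c :: rest).reverse.length = rest.length + 3 := by
        simp
      have hnlt : ¬ (a :: b :: c :: rest).reverse.length < 3 := by omega
      have hget : ∀ k : Nat, k < rest.length + 3 →
          PySem.List.pyGet? (a :: b :: c :: rest).reverse (-(((k:Int)) + 1)) =
            (a :: b :: c :: rest)[k]? := by
        intro k hk
        have := PySem.List.pyGet?_neg_natCast (xs := (a :: b :: c :: rest).reverse)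
          (k := k + 1) (by omega) (by rw [hlen]; omega)
        have hcast : -((k:Int) + 1) = -(((k+1 : Nat) : Int)) := by push_cast; ring
        rw [hcast, this, List.getElem?_reverse (by simp)]
        congr 1
        simp
        omega
      have h0 := hget 0 (by omega)
      have h1 := hget 1 (by omega)
      have h2 := hget 2 (by omega)
      simp only [check3, check3_alt, foldl_rev, hnlt, if_false]
      norm_num at h0 h1 h2
      simp only [List.reverse_cons, List.append_assoc, List.cons_append,
        List.nil_append]
      rw [h0, h1, h2]
      have hlen' : (rest.reverse ++ [c, b, a]).length = rest.length + 3 := by simp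
      cases a with
      | true => simp [gscore]
      | false =>
        cases b with
        | true => simp [gscore]
        | false =>
          cases c with
          | true => simp [gscore]
          | false =>
            simp only [gscore]
            cases rest with
            | nil => simp [gscore]
            | cons d t =>
                cases d with
                | true =>
                    simp [gscore, pyGet_neg4]
                | false =>
                    simp [gscore, pyGet_neg4]

-- ===== VERDICT (by name: the statement is the Claim_ definition above) =====
theorem check3_spec : Claim_equal_check3 := by
  intro l _
  unfold Spec_check3
  have := main_rev l.reverse
  simpa using this
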